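-- pv_equiv track=rewrite | github.com/yz4004/codeforce-python | daily/problem_list/2025/1119.py | solve
-- ===== SOURCE A (Python) =====
-- import itertools
--
-- def solve(n, a):   # usage
--
--     # 和位置无关 考虑排序后枚举x
--     # 对每个 x，枚举 kx，阶梯状的向后枚举
--     # [kx - (k+1)x) 所有出现在数组里的数每人可以提供 kx
--     # 排序后二分搜索可以，也可以调和级数枚举，U*logU 范围不大更快
--
--     res = 0
--     u = max(a)
--     cnt = [0]*(u+1)
--     for x in a:
--         cnt[x] += 1
--
--     ps = list(itertools.accumulate(cnt, initial=0)) # ps[x] - 小于x的所有数的计数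
--     for x in range(1, u+1):
--         # x 2x ...
--         if cnt[x] == 0: continue
--
--         cur = 0
--         for kx in range(x, u+1, x):
--             cur += ps[-1] - ps[kx]
--
--         cur *= x
--         if cur > res:
--             res = cur
--     return res
-- ===== SOURCE B (Python) =====
-- def solve(n, a):
--     res = 0
--     u = max(a)
--     cnt = [0] * (u + 1)
--     for x in a:
--         cnt[x] += 1
--     vals = [(v, c) for v, c in enumerate(cnt) if c]
--     for v, _ in vals:
--         if v >= 1:
--             cur = v * sum(c * (w // v) for w, c in vals)
--             if cur > res:
--                 res = cur
--     return res
-- ===== Notes on version B (the rewrite author's own statement) =====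
-- stated objective: alternative
-- what changed: B keeps the value-indexed count array but replaces A's prefix-sum array and harmonic enumeration of multiples kx with a distinct-(value,count) list and the direct evaluation x*sum(count[v]*(v//x)), maximised over the distinct values >= 1.
import Mathlib
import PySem

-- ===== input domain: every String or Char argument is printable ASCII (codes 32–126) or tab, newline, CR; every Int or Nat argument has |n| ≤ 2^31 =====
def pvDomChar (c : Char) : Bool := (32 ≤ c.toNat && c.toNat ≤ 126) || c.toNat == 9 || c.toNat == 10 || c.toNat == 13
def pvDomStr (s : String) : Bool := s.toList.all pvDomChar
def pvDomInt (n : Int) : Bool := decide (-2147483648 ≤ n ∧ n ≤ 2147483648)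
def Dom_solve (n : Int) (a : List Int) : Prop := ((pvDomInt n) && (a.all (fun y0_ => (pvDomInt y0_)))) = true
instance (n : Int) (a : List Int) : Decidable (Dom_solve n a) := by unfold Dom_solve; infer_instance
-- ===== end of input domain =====

-- B keeps A's value-indexed count array but replaces the prefix sums and the harmonic enumeration of
-- multiples kx by the direct formula x * Σ count[v] * (v // x) over the distinct values (objective: alternative).

-- ===== PORT A =====
-- Python's list item assignment 'cnt[x] += 1', shared by both ports (none = IndexError;
-- pyGet?/pySet? are Python's indexing, including the negative-index wraparound)
def pyIncrAt (cnt : List Int) (x : Int) : Option (List Int) :=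
  match PySem.List.pyGet? cnt x with
  | none => none
  | some c => PySem.List.pySet? cnt x (c + 1)

def solve (n : Int) (a : List Int) : Int :=
  match PySem.List.max? a (fun y => y) with
  | none => 0  -- Python: ValueError from max(a) on empty a (outside Pre_solve)
  | some u =>
    match a.foldlM pyIncrAt (List.replicate (u + 1).toNat (0 : Int)) with
    | none => 0  -- Python: IndexError from cnt[x] += 1 (outside Pre_solve)
    | some cnt =>
      let ps := cnt.scanl (· + ·) 0
      (PySem.List.pyRange 1 (u + 1) 1).foldl (fun res x =>
        if PySem.List.pyGetD cnt x 0 = 0 then res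
        else
          let cur := (PySem.List.pyRange x (u + 1) x).foldl
            (fun cur kx => cur + (PySem.List.pyGetD ps (-1) 0 - PySem.List.pyGetD ps kx 0)) 0
          let cur2 := cur * x
          if cur2 > res then cur2 else res) 0

-- ===== PORT B =====
def solve_alt (n : Int) (a : List Int) : Int :=
  match PySem.List.max? a (fun y => y) with
  | none => 0  -- Python: ValueError from max(a) on empty a (outside Pre_solve)
  | some u =>
    match a.foldlM pyIncrAt (List.replicate (u + 1).toNat (0 : Int)) with
    | none => 0  -- Python: IndexError from cnt[x] += 1 (outside Pre_solve)
    | some cnt =>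
      -- enumerate(cnt): the index range zipped with cnt — the same list as PySem.List.enumerate cnt
      -- (proved by zip_pyRange_enumerate below); written this way so the port evaluates without deep recursion
      let vals := ((PySem.List.pyRange 0 (PySem.List.len cnt) 1).zip cnt).filter (fun p => !(p.2 == 0))
      vals.foldl (fun res p =>
        if 1 ≤ p.1 then
          let cur := p.1 * (vals.map (fun q => q.2 * PySem.Int.floordiv q.1 p.1)).sum
          if cur > res then cur else res
        else res) 0

-- ===== PRECONDITION & SPEC =====
-- Pre_solve is exactly where A (and B, which counts the same way) returns: a nonempty (else max(a)
-- raises ValueError) and every element at least -(max(a)+1) (else cnt[x] += 1 raises IndexError).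
def Pre_solve (n : Int) (a : List Int) : Prop :=
  a ≠ [] ∧ ∃ m ∈ a, (∀ y ∈ a, y ≤ m) ∧ ∀ x ∈ a, 0 ≤ x + m + 1
instance (n : Int) (a : List Int) : Decidable (Pre_solve n a) := by unfold Pre_solve; infer_instance
def pvWitness_solve : Int × List Int := (3, [2, 1, 2])

def Spec_solve (n : Int) (a : List Int) (out : Int) : Prop := out = solve_alt n a
instance (n : Int) (a : List Int) (out : Int) : Decidable (Spec_solve n a out) := by unfold Spec_solve; infer_instance

-- ===== CLAIM (what is proved, stated in full; the proofs are below) =====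
def Claim_equal_solve : Prop := ∀ (n : Int) (a : List Int), Dom_solve n a → Pre_solve n a → Spec_solve n a (solve n a)

-- ===== LEMMAS AND PROOFS =====

-- the common value both loops maximise, over the whole count array: x * Σ_w cnt[w] * (w // x)
def gfun (cnt : List Int) (x : Int) : Int :=
  x * ((PySem.List.enumerate cnt).map (fun q => q.2 * PySem.Int.floordiv q.1 x)).sum

lemma pyIncrAt_length {cnt c' : List Int} {x : Int} (h : pyIncrAt cnt x = some c') :
    c'.length = cnt.length := by
  unfold pyIncrAt at h
  cases hg : PySem.List.pyGet? cnt x with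
  | none => rw [hg] at h; cases h
  | some c =>
    rw [hg] at h
    simp only [PySem.List.pySet?] at h
    cases hi : PySem.List.pyIdx? cnt.length x with
    | none => rw [hi] at h; cases h
    | some k =>
      rw [hi] at h
      simp only [Option.map_some] at h
      cases h
      simp

lemma foldlM_pyIncrAt_length : ∀ (a : List Int) (c0 c : List Int),
    a.foldlM pyIncrAt c0 = some c → c.length = c0.length := by
  intro a
  induction a with
  | nil => intro c0 c h; simp [List.foldlM] at h; rw [h]
  | cons v t ih =>
    intro c0 c h
    rw [List.foldlM_cons] at h
    cases hg : pyIncrAt c0 v with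
    | none => rw [hg] at h; cases h
    | some c1 =>
      simp only [hg, Option.bind_eq_bind, Option.bind_some] at h
      rw [ih c1 c h, pyIncrAt_length hg]

lemma pyIncrAt_nil (x : Int) : pyIncrAt [] x = none := by
  unfold pyIncrAt
  simp [PySem.List.pyGet?, PySem.List.pyIdx?]

lemma foldlM_pyIncrAt_ne_nil {a : List Int} {c0 c : List Int} (hne : a ≠ [])
    (h : a.foldlM pyIncrAt c0 = some c) : c0 ≠ [] := by
  cases a with
  | nil => exact absurd rfl hne
  | cons v t =>
    rintro rfl
    rw [List.foldlM_cons, pyIncrAt_nil] at h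
    cases h

-- prefix sums of the scanl (itertools.accumulate with initial=0)
lemma scanl_add_getD : ∀ (cnt : List Int) (s : Int) (j : Nat), j ≤ cnt.length →
    (cnt.scanl (· + ·) s).getD j 0 = s + (cnt.take j).sum := by
  intro cnt
  induction cnt with
  | nil => intro s j hj; simp at hj; subst hj; simp
  | cons c t ih =>
    intro s j hj
    cases j with
    | zero => simp
    | succ j =>
      simp only [List.scanl_cons, List.getD_cons_succ, List.take_succ_cons, List.sum_cons]
      rw [ih (s + c) j (by simpa using hj)]
      ring

-- suffix sums of the count array, written against enumerate
lemma enumerate_ite_sum : ∀ (cnt : List Int) (s : Int) (m : Nat),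
    ((PySem.List.enumerate cnt s).map (fun q => if s + (m : Int) ≤ q.1 then q.2 else 0)).sum
      = (cnt.drop m).sum := by
  intro cnt
  induction cnt with
  | nil => intro s m; simp [PySem.List.enumerate]
  | cons c t ih =>
    intro s m
    rw [PySem.List.enumerate_cons, List.map_cons, List.sum_cons]
    cases m with
    | zero =>
      rw [if_pos (by omega)]
      have hcongr : (PySem.List.enumerate t (s + 1)).map (fun q => if s + ((0 : Nat) : Int) ≤ q.1 then q.2 else 0)
          = (PySem.List.enumerate t (s + 1)).map (fun q => if (s + 1) + ((0 : Nat) : Int) ≤ q.1 then q.2 else 0) := by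
        apply List.map_congr_left
        intro q hq
        obtain ⟨k, hk, rfl⟩ := (PySem.List.mem_enumerate_iff t (s + 1) q).mp hq
        have h1 : s + ((0 : Nat) : Int) ≤ s + 1 + (k : Int) := by push_cast; omega
        have h2 : (s + 1) + ((0 : Nat) : Int) ≤ s + 1 + (k : Int) := by push_cast; omega
        rw [if_pos h1, if_pos h2]
      rw [hcongr, ih (s + 1) 0]
      simp
    | succ m =>
      rw [if_neg (by push_cast; omega)]
      have hcongr : (PySem.List.enumerate t (s + 1)).map (fun q => if s + ((m + 1 : Nat) : Int) ≤ q.1 then q.2 else 0)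
          = (PySem.List.enumerate t (s + 1)).map (fun q => if (s + 1) + ((m : Nat) : Int) ≤ q.1 then q.2 else 0) := by
        apply List.map_congr_left
        intro q _
        have : s + ((m + 1 : Nat) : Int) = (s + 1) + ((m : Nat) : Int) := by push_cast; ring
        rw [this]
      rw [hcongr, ih (s + 1) m]
      simp

-- terms with a zero count contribute nothing to the sum
lemma filter_zero_sum (E : List (Int × Int)) (f : Int → Int) :
    ((E.filter (fun p => !(p.2 == 0))).map (fun q => q.2 * f q.1)).sum
      = (E.map (fun q => q.2 * f q.1)).sum := by
  induction E with
  | nil => simp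
  | cons p t ih =>
    by_cases hp : p.2 = 0
    · simp [hp, ih]
    · simp [hp, ih]

-- exchange the two summations
lemma sum_sum_comm {α : Type} (R : List Int) (E : List α) (f : Int → α → Int) :
    (R.map (fun k => (E.map (f k)).sum)).sum = (E.map (fun q => (R.map (fun k => f k q)).sum)).sum := by
  induction R with
  | nil => simp
  | cons k t ih =>
    simp only [List.map_cons, List.sum_cons, ih]
    rw [← PySem.List.sum_map_add_int]

-- counting the multiples x, 2x, …, Kx that are ≤ v
lemma range_mult_sum (x v : Int) (hx : 0 < x) (hv : 0 ≤ v) : ∀ K : Nat,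
    ((List.range K).map (fun (k : Nat) => if x + x * (k : Int) ≤ v then (1 : Int) else 0)).sum
      = min (K : Int) (v / x) := by
  intro K
  induction K with
  | zero =>
    have : 0 ≤ v / x := Int.ediv_nonneg hv (le_of_lt hx)
    simp; omega
  | succ K ih =>
    rw [List.range_succ, List.map_append, List.sum_append, ih]
    have hiff : x + x * (K : Int) ≤ v ↔ (K : Int) + 1 ≤ v / x := by
      rw [Int.le_ediv_iff_mul_le hx]; constructor <;> intro h <;> nlinarith
    simp only [List.map_cons, List.map_nil, List.sum_cons, List.sum_nil]
    by_cases h : x + x * (K : Int) ≤ v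
    · have := hiff.mp h
      simp [h]; omega
    · have := fun hc => h (hiff.mpr hc)
      simp [h]; omega

lemma ite_gt_eq_max (r b : Int) : (if b > r then b else r) = max r b := by
  split_ifs <;> omega

-- the two loops agree on any count array of length u+1
lemma loops_eq (u : Int) (cnt : List Int) (hu0 : 0 ≤ u) (hlen : (cnt.length : Int) = u + 1) :
    (PySem.List.pyRange 1 (u + 1) 1).foldl (fun res x =>
        if PySem.List.pyGetD cnt x 0 = 0 then res
        else
          let cur := (PySem.List.pyRange x (u + 1) x).foldl
            (fun cur kx => cur + (PySem.List.pyGetD (cnt.scanl (· + ·) 0) (-1) 0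
              - PySem.List.pyGetD (cnt.scanl (· + ·) 0) kx 0)) 0
          let cur2 := cur * x
          if cur2 > res then cur2 else res) 0
      = ((PySem.List.enumerate cnt).filter (fun p => !(p.2 == 0))).foldl (fun res p =>
          if 1 ≤ p.1 then
            let cur := p.1 * (((PySem.List.enumerate cnt).filter (fun p => !(p.2 == 0))).map
              (fun q => q.2 * PySem.Int.floordiv q.1 p.1)).sum
            if cur > res then cur else res
          else res) 0 := by
  have hps_len : (cnt.scanl (· + ·) (0 : Int)).length = cnt.length + 1 := List.length_scanl
  have hlast : PySem.List.pyGetD (cnt.scanl (· + ·) (0 : Int)) (-1) 0 = cnt.sum := by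
    rw [PySem.List.pyGetD, PySem.List.pyGet?_neg_one, List.getLast?_eq_getElem?,
      ← List.getD_eq_getElem?_getD, hps_len]
    simp only [Nat.add_sub_cancel]
    rw [scanl_add_getD cnt 0 cnt.length (le_refl _), List.take_length]
    ring
  have hps : ∀ kx : Int, 0 ≤ kx → kx ≤ u →
      PySem.List.pyGetD (cnt.scanl (· + ·) (0 : Int)) kx 0 = (cnt.take kx.toNat).sum := by
    intro kx h0 h1
    rw [PySem.List.pyGetD_of_nonneg _ _ h0, scanl_add_getD cnt 0 kx.toNat (by omega)]
    ring
  -- the inner loop of A computes gfun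
  have hcur : ∀ x : Int, 1 ≤ x → x ≤ u →
      ((PySem.List.pyRange x (u + 1) x).foldl
        (fun cur kx => cur + (PySem.List.pyGetD (cnt.scanl (· + ·) (0 : Int)) (-1) 0
          - PySem.List.pyGetD (cnt.scanl (· + ·) (0 : Int)) kx 0)) 0) * x = gfun cnt x := by
    intro x hx1 hxu
    have hx0 : (0 : Int) < x := by omega
    rw [PySem.List.foldl_add, zero_add]
    have step1 : (PySem.List.pyRange x (u + 1) x).map
        (fun kx => PySem.List.pyGetD (cnt.scanl (· + ·) (0 : Int)) (-1) 0
          - PySem.List.pyGetD (cnt.scanl (· + ·) (0 : Int)) kx 0)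
        = (PySem.List.pyRange x (u + 1) x).map
        (fun kx => ((PySem.List.enumerate cnt).map (fun q => if kx ≤ q.1 then q.2 else 0)).sum) := by
      apply List.map_congr_left
      intro kx hkx
      obtain ⟨hk1, hk2, -⟩ := (PySem.List.mem_pyRange_iff_of_pos hx0 kx).mp hkx
      rw [hlast, hps kx (by omega) (by omega)]
      have hsum := enumerate_ite_sum cnt 0 kx.toNat
      have hkxcast : (0 : Int) + ((kx.toNat : Nat) : Int) = kx := by omega
      rw [hkxcast] at hsum
      rw [hsum]
      have := List.sum_take_add_sum_drop cnt kx.toNat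
      omega
    rw [step1, sum_sum_comm (PySem.List.pyRange x (u + 1) x) (PySem.List.enumerate cnt) (fun kx (q : Int × Int) => if kx ≤ q.1 then q.2 else 0)]
    have step2 : ((PySem.List.enumerate cnt).map (fun q => ((PySem.List.pyRange x (u + 1) x).map
        (fun kx => if kx ≤ q.1 then q.2 else 0)).sum))
        = (PySem.List.enumerate cnt).map (fun q => q.2 * PySem.Int.floordiv q.1 x) := by
      apply List.map_congr_left
      intro q hq
      obtain ⟨k, hk, rfl⟩ := (PySem.List.mem_enumerate_iff cnt 0 q).mp hq
      have hw0 : (0 : Int) ≤ 0 + (k : Int) := by omega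
      have hwu : 0 + (k : Int) ≤ u := by omega
      have hpull : (PySem.List.pyRange x (u + 1) x).map (fun kx => if kx ≤ (0 + (k : Int), cnt[k]).1 then (0 + (k : Int), cnt[k]).2 else 0)
          = (PySem.List.pyRange x (u + 1) x).map (fun kx => cnt[k] * (if kx ≤ 0 + (k : Int) then (1 : Int) else 0)) := by
        apply List.map_congr_left
        intro kx _
        by_cases h : kx ≤ 0 + (k : Int) <;> simp [h]
      rw [hpull, List.sum_map_mul_left]
      rw [PySem.List.pyRange_of_pos x (u + 1) hx0, if_pos (by omega)]
      have harg : (u + 1 - x + x - 1) = u := by ring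
      rw [harg, List.map_map]
      have hcomp : ((fun kx => if kx ≤ 0 + (k : Int) then (1 : Int) else 0) ∘ fun (j : Nat) => x + x * (j : Int))
          = fun (j : Nat) => if x + x * (j : Int) ≤ 0 + (k : Int) then (1 : Int) else 0 := by
        funext j
        simp [Function.comp]
      rw [hcomp, range_mult_sum x (0 + (k : Int)) hx0 hw0]
      have h1 : ((u / x).toNat : Int) = u / x := by
        have := Int.ediv_nonneg hu0 (le_of_lt hx0)
        omega
      have h2 : (0 + (k : Int)) / x ≤ u / x := Int.ediv_le_ediv hx0 hwu
      rw [h1, PySem.Int.floordiv_eq_ediv_of_pos hx0]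
      have : min (u / x) ((0 + (k : Int)) / x) = (0 + (k : Int)) / x := by omega
      rw [this]
    rw [step2, mul_comm, gfun]
  -- rewrite A's outer loop to a filtered max-fold
  have hA : (PySem.List.pyRange 1 (u + 1) 1).foldl (fun res x =>
        if PySem.List.pyGetD cnt x 0 = 0 then res
        else
          let cur := (PySem.List.pyRange x (u + 1) x).foldl
            (fun cur kx => cur + (PySem.List.pyGetD (cnt.scanl (· + ·) 0) (-1) 0
              - PySem.List.pyGetD (cnt.scanl (· + ·) 0) kx 0)) 0
          let cur2 := cur * x
          if cur2 > res then cur2 else res) 0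
      = List.foldl (fun res x => max res (gfun cnt x)) 0
        ((PySem.List.pyRange 1 (u + 1) 1).filter (fun x => decide ¬(PySem.List.pyGetD cnt x 0 = 0))) := by
    rw [PySem.List.foldl_congr_mem _ _
      (fun res x => if ¬(PySem.List.pyGetD cnt x 0 = 0) then max res (gfun cnt x) else res) 0 ?_]
    · rw [PySem.List.foldl_ite_eq_foldl_filter]
    · intro res x hx
      obtain ⟨hx1, hx2⟩ := (PySem.List.mem_pyRange_one).mp hx
      by_cases hc : PySem.List.pyGetD cnt x 0 = 0
      · simp [hc]
      · simp only [hc, if_neg, not_false_iff, if_true]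
        rw [ite_gt_eq_max, hcur x hx1 (by omega)]
  -- rewrite B's outer loop to the same filtered max-fold
  have hB : ((PySem.List.enumerate cnt).filter (fun p => !(p.2 == 0))).foldl (fun res p =>
          if 1 ≤ p.1 then
            let cur := p.1 * (((PySem.List.enumerate cnt).filter (fun p => !(p.2 == 0))).map
              (fun q => q.2 * PySem.Int.floordiv q.1 p.1)).sum
            if cur > res then cur else res
          else res) 0
      = List.foldl (fun res p => max res (gfun cnt p.1)) 0
        (((PySem.List.enumerate cnt).filter (fun p => !(p.2 == 0))).filter (fun p => decide (1 ≤ p.1))) := by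
    rw [PySem.List.foldl_congr_mem _ _
      (fun res p => if (1 ≤ p.1) then max res (gfun cnt p.1) else res) 0 ?_]
    · rw [PySem.List.foldl_ite_eq_foldl_filter]
    · intro res p _
      by_cases hc : 1 ≤ p.1
      · simp only [hc, if_true]
        rw [filter_zero_sum (PySem.List.enumerate cnt) (fun w => PySem.Int.floordiv w p.1), ite_gt_eq_max]
        rfl
      · simp [hc]
  rw [hA, hB]
  -- the two filtered index lists are the same list
  have hlists : ((PySem.List.pyRange 1 (u + 1) 1).filter (fun x => decide ¬(PySem.List.pyGetD cnt x 0 = 0)))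
      = (((PySem.List.enumerate cnt).filter (fun p => !(p.2 == 0))).filter (fun p => decide (1 ≤ p.1))).map (·.1) := by
    rw [PySem.List.enumerate_eq_map_pyRange cnt 0]
    rw [List.filter_map, List.filter_map, List.map_map]
    have hfst : ((fun p : Int × Int => p.1) ∘ fun j => (j, PySem.List.pyGetD cnt j 0)) = id := by
      funext j
      rfl
    rw [hfst, List.map_id, List.filter_filter]
    have hlen2 : PySem.List.len cnt = u + 1 := by
      simp [PySem.List.len, hlen]
    rw [hlen2]
    have hsplit : PySem.List.pyRange 0 (u + 1) 1 = 0 :: PySem.List.pyRange 1 (u + 1) 1 :=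
      PySem.List.pyRange_one_cons (by omega)
    rw [hsplit, List.filter_cons]
    simp only [Function.comp]
    rw [if_neg (by simp)]
    apply List.filter_congr
    intro x hx
    obtain ⟨hx1, hx2⟩ := (PySem.List.mem_pyRange_one).mp hx
    by_cases h0 : PySem.List.pyGetD cnt x 0 = 0 <;> simp [hx1, h0]
  rw [hlists, List.foldl_map]
-- after foldl_map both sides are folds over the same pair list with the same body

lemma zip_pyRange_enumerate : ∀ (xs : List Int) (s : Int),
    (PySem.List.pyRange s (s + (xs.length : Int)) 1).zip xs = PySem.List.enumerate xs s := by
  intro xs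
  induction xs with
  | nil =>
    intro s
    rw [PySem.List.pyRange_one_eq_nil (by simp)]
    simp [PySem.List.enumerate]
  | cons x t ih =>
    intro s
    rw [PySem.List.pyRange_one_cons (by simp), PySem.List.enumerate_cons]
    have hb : s + ((x :: t).length : Int) = (s + 1) + (t.length : Int) := by simp; ring
    rw [hb, List.zip_cons_cons, ih (s + 1)]

-- ===== VERDICT (by name: the statement is the Claim_ definition above) =====
theorem solve_spec : Claim_equal_solve := by
  intro n a _ hpre
  unfold Spec_solve
  obtain ⟨hne, -⟩ := hpre
  cases hmax : PySem.List.max? a (fun y => y) with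
  | none => simp only [solve, solve_alt, hmax]
  | some u =>
  cases hres : a.foldlM pyIncrAt (List.replicate (u + 1).toNat (0 : Int)) with
  | none => simp only [solve, solve_alt, hmax, hres]
  | some cnt =>
  have hlen0 : cnt.length = (u + 1).toNat := by
    rw [foldlM_pyIncrAt_length a _ cnt hres]
    simp
  have hc0ne : (List.replicate (u + 1).toNat (0 : Int)) ≠ [] := foldlM_pyIncrAt_ne_nil hne hres
  have hu0 : 0 ≤ u := by
    rcases Nat.eq_zero_or_pos (u + 1).toNat with h | h
    · exact absurd (by simp [h]) hc0ne
    · omega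
  have hlen : (cnt.length : Int) = u + 1 := by rw [hlen0]; omega
  have hzip : (PySem.List.pyRange 0 (PySem.List.len cnt) 1).zip cnt = PySem.List.enumerate cnt 0 := by
    have := zip_pyRange_enumerate cnt 0
    rw [zero_add] at this
    rw [← this]
    rfl
  have := loops_eq u cnt hu0 hlen
  simp only [solve, solve_alt, hmax, hres, hzip]
  exact this
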